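-- pv_equiv track=rewrite | github.com/koii-network/prometheus-beta | src/multi_array_processor.py | process_multi_dimensional_array
-- ===== SOURCE A (Python) =====
-- def process_multi_dimensional_array(input_array):
--     """
--     Process a multi-dimensional array with the following steps:
--     1. Remove empty sub-arrays
--     2. Reverse the order of elements in each sub-array
--     3. Flatten the array
--     4. Remove duplicates while maintaining original order
--
--     Args:
--         input_array (list): A multi-dimensional list to process
--
--     Returns:
--         list: Processed and transformed list
--     """
--     # Remove empty sub-arrays
--     non_empty_arrays = [subarray for subarray in input_array if subarray]
--
--     # Reverse each sub-array
--     reversed_arrays = [subarray[::-1] for subarray in non_empty_arrays]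
--
--     # Flatten the array
--     flattened_array = [item for subarray in reversed_arrays for item in subarray]
--
--     # Remove duplicates while maintaining order
--     seen = set()
--     result = []
--     for item in flattened_array:
--         if item not in seen:
--             result.append(item)
--             seen.add(item)
--
--     return result
-- ===== SOURCE B (Python) =====
-- def process_multi_dimensional_array(input_array):
--     # Walk the rows BACKWARDS, each row in its natural order; deleting an
--     # existing key and re-inserting moves it to the end, so `last` ends up
--     # holding each value keyed by its LAST occurrence in the backward stream.
--     # Reversing that gives first-seen order of the reversed-row flattening.
--     last = {}
--     for row in reversed(input_array):
--         for x in row: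
--             if x in last:
--                 del last[x]
--             last[x] = True
--     return list(last)[::-1]
-- ===== Notes on version B (the rewrite author's own statement) =====
-- stated objective: alternative
-- what changed: Instead of A's forward pipeline (filter empties, reverse each row, flatten, first-seen dedup with a seen-set and result list), B walks the rows backwards in each row's natural order keeping each value's LAST occurrence via dict delete-and-reinsert (move-to-end), and reverses the key list once at the end; no per-row reversal, no seen-set, no intermediate lists.
import Mathlib
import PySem

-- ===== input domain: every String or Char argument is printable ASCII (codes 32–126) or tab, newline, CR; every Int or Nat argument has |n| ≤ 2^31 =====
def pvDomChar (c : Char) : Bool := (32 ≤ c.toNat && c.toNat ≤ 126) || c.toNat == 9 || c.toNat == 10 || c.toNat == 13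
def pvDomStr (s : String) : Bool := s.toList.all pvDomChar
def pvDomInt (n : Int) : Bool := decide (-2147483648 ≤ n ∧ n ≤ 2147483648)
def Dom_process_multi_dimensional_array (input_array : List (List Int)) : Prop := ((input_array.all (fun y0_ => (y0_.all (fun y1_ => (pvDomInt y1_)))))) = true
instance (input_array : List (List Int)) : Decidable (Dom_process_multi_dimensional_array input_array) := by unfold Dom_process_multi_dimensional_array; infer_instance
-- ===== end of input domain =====

-- B replaces A's forward pipeline (filter empties, reverse each row, flatten, seen-set dedup)
-- with a backward walk over the rows keeping each value's LAST occurrence in a dict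
-- (delete-and-reinsert = move-to-end), whose key list is reversed once at the end.


-- ===== PORT A =====
-- one dedup step: 'if item not in seen: result.append(item); seen.add(item)'
def pvDedupStep (acc : List Int × PySem.Set Int) (item : Int) : List Int × PySem.Set Int :=
  if PySem.Set.contains acc.2 item then acc
  else (acc.1 ++ [item], PySem.Set.add acc.2 item)

def process_multi_dimensional_array (input_array : List (List Int)) : List Int :=
  let non_empty_arrays := input_array.filter (fun subarray => !subarray.isEmpty)
  let reversed_arrays := non_empty_arrays.map (fun subarray => subarray.reverse)
  let flattened_array := reversed_arrays.flatMap (fun subarray => subarray)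
  let fin := flattened_array.foldl pvDedupStep ([], PySem.Set.empty)
  fin.1

-- ===== PORT B =====
-- 'if x in last: del last[x]' then 'last[x] = True'
def pvMoveEnd (last : PySem.Dict Int Bool) (x : Int) : PySem.Dict Int Bool :=
  (if last.contains x then last.erase x else last).insert x true

def process_multi_dimensional_array_alt (input_array : List (List Int)) : List Int :=
  let last := input_array.reverse.foldl (fun last row => row.foldl pvMoveEnd last) PySem.Dict.empty
  last.keys.reverse

-- ===== PRECONDITION & SPEC =====
def Spec_process_multi_dimensional_array (input_array : List (List Int)) (out : List Int) : Prop := out = process_multi_dimensional_array_alt input_array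
instance (input_array : List (List Int)) (out : List Int) : Decidable (Spec_process_multi_dimensional_array input_array out) := by unfold Spec_process_multi_dimensional_array; infer_instance

-- ===== CLAIM =====
def Claim_equal_process_multi_dimensional_array : Prop := ∀ (input_array : List (List Int)), Dom_process_multi_dimensional_array input_array → Spec_process_multi_dimensional_array input_array (process_multi_dimensional_array input_array)

-- ===== LEMMAS AND PROOFS =====

-- A's manual seen/result loop keeps result = seen at every step; both equal foldl Set.add.
theorem pvFold_pair (xs : List Int) (s : PySem.Set Int) :
    xs.foldl pvDedupStep (s, s) = (xs.foldl PySem.Set.add s, xs.foldl PySem.Set.add s) := by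
  induction xs generalizing s with
  | nil => rfl
  | cons x xs ih =>
      simp only [List.foldl_cons, pvDedupStep, PySem.Set.add]
      split <;> exact ih _

-- filtering out empty sub-arrays does not change the flattened reversed list
theorem pvFlat_filter (l : List (List Int)) :
    (l.filter (fun s => !s.isEmpty)).flatMap (fun s => s.reverse)
      = l.flatMap (fun s => s.reverse) := by
  induction l with
  | nil => rfl
  | cons x xs ih =>
      by_cases h : x.isEmpty
      · simp [List.isEmpty_iff.mp h, ih]
      · simp [h, ih]

-- the list-of-keys model of one move-to-end step
def pvKeyStep (out : List Int) (x : Int) : List Int :=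
  out.filter (fun a => !(a == x)) ++ [x]

-- whether or not x is present, 'del then insert' filters x's pair out and appends it
theorem pvMoveEnd_keys (d : PySem.Dict Int Bool) (x : Int) :
    (pvMoveEnd d x).keys = pvKeyStep d.keys x := by
  unfold pvMoveEnd pvKeyStep
  by_cases hc : d.contains x
  · rw [if_pos hc]
    have hnc : (d.erase x).contains x = false := by
      simp [PySem.Dict.contains, PySem.Dict.erase, List.any_filter]
    rw [show (d.erase x).insert x true
          = PySem.Dict.mk ((d.erase x).items ++ [(x, true)]) by
      simp [PySem.Dict.insert, hnc]]
    simp [PySem.Dict.keys, PySem.Dict.erase, List.filter_map, Function.comp_def]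
  · rw [if_neg hc]
    rw [show d.insert x true = PySem.Dict.mk (d.items ++ [(x, true)]) by
      simp [PySem.Dict.insert, hc]]
    have hfix : d.items.filter (fun p => !(p.1 == x)) = d.items := by
      apply List.filter_eq_self.mpr
      intro p hp
      simp only [PySem.Dict.contains, List.any_eq_true, not_exists, not_and,
        Bool.not_eq_true] at hc
      simp [hc p hp]
    calc (PySem.Dict.mk (d.items ++ [(x, true)])).keys
        = d.items.map (fun p => p.1) ++ [x] := by simp [PySem.Dict.keys]
      _ = (d.items.filter (fun p => !(p.1 == x))).map (fun p => p.1) ++ [x] := by rw [hfix]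
      _ = _ := by simp [List.filter_map, Function.comp_def, PySem.Dict.keys]

-- B's nested row loops, on the key lists: one fold of pvKeyStep over the backward flattening
theorem pvFold_keys (l : List (List Int)) (d : PySem.Dict Int Bool) :
    (l.foldl (fun last row => row.foldl pvMoveEnd last) d).keys
      = (l.flatMap (fun row => row)).foldl pvKeyStep d.keys := by
  have hrow : ∀ (ys : List Int) (d : PySem.Dict Int Bool),
      (ys.foldl pvMoveEnd d).keys = ys.foldl pvKeyStep d.keys := by
    intro ys
    induction ys with
    | nil => intro d; rfl
    | cons y ys ih => intro d; rw [List.foldl_cons, List.foldl_cons, ih, pvMoveEnd_keys]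
  induction l generalizing d with
  | nil => rfl
  | cons r l ih => simp [List.foldl_append, ih, hrow]

-- running the keep-last loop from any accumulator: survivors of acc not touched by ys
-- stay in front of the result of the loop from empty
theorem pvKeyStep_acc (ys : List Int) (acc : List Int) :
    ys.foldl pvKeyStep acc
      = acc.filter (fun a => !ys.contains a) ++ ys.foldl pvKeyStep [] := by
  induction ys generalizing acc with
  | nil => simp
  | cons x ys ih =>
      rw [List.foldl_cons, ih (pvKeyStep acc x), List.foldl_cons,
        show pvKeyStep [] x = [x] by rfl, ih [x]]
      unfold pvKeyStep
      rw [List.filter_append, List.filter_filter, List.append_assoc]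
      congr 1
      apply List.filter_congr
      intro a _
      by_cases hax : a = x <;> by_cases hay : a ∈ ys <;> simp [hax, hay]

-- the backward keep-last loop, reversed, is set-of-list of the reversed stream
theorem pvKeyStep_reverse (ys : List Int) :
    (ys.foldl pvKeyStep []).reverse = PySem.Set.ofList ys.reverse := by
  induction ys with
  | nil => rfl
  | cons x ys ih =>
      rw [List.foldl_cons, pvKeyStep_acc ys _, List.reverse_append, ih,
        show pvKeyStep [] x = [x] by rfl,
        show (x :: ys).reverse = ys.reverse ++ [x] by simp,
        show PySem.Set.ofList (ys.reverse ++ [x])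
            = PySem.Set.add (PySem.Set.ofList ys.reverse) x by
          simp [PySem.Set.ofList_eq_foldl, List.foldl_append]]
      unfold PySem.Set.add
      have hc : PySem.Set.contains (PySem.Set.ofList ys.reverse) x = decide (x ∈ ys) := by
        simp [PySem.Set.contains, PySem.Set.mem_ofList]
      by_cases hm : x ∈ ys
      · rw [if_pos (by rw [hc]; simp [hm])]
        simp [hm]
      · rw [if_neg (by rw [hc]; simp [hm])]
        simp [hm]

-- A's stream is B's backward stream reversed
theorem pvStream_reverse (l : List (List Int)) :
    l.reverse.flatten.reverse = l.flatMap (fun s => s.reverse) := by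
  induction l with
  | nil => rfl
  | cons x xs ih => simp [List.flatten_append, ih]

-- ===== VERDICT =====
theorem process_multi_dimensional_array_spec : Claim_equal_process_multi_dimensional_array := by
  intro input_array _
  show _ = _
  simp only [process_multi_dimensional_array, process_multi_dimensional_array_alt]
  rw [show (PySem.Set.empty : PySem.Set Int) = [] from rfl]
  rw [List.flatMap_map, pvFold_pair, pvFlat_filter, pvFold_keys,
    show (PySem.Dict.empty : PySem.Dict Int Bool).keys = [] from rfl, pvKeyStep_reverse]
  rw [show (input_array.reverse.flatMap (fun row => row)).reverse
        = input_array.flatMap (fun s => s.reverse) by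
    simpa using pvStream_reverse input_array]
  simp [PySem.Set.ofList_eq_foldl]
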